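-- pv_equiv track=rewrite | github.com/lotus2742/code-review-agent | diff_utils.py | filter_lock_files
-- ===== SOURCE A (Python) =====
-- _LOCK_FILE_PATTERNS = ["package-lock.json", "yarn.lock", "pnpm-lock.yaml", "go.sum"]
--
-- def filter_lock_files(diff: str) -> str:
--     """过滤掉 diff 中的 lock 文件片段"""
--     filtered: list[str] = []
--     skip_current = False
--     for line in diff.split("\n"):
--         if line.startswith("diff --git"):
--             skip_current = any(p in line for p in _LOCK_FILE_PATTERNS)
--         if not skip_current:
--             filtered.append(line)
--     return "\n".join(filtered)
-- ===== SOURCE B (Python) =====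
-- _LOCK_FILE_PATTERNS = ["package-lock.json", "yarn.lock", "pnpm-lock.yaml", "go.sum"]
--
--
-- def filter_lock_files(diff: str) -> str:
--     """Segment-based rewrite: split into preamble + per-header segments, keep non-lock segments."""
--     lines = diff.split("\n")
--
--     def is_header(l):
--         return l.startswith("diff --git")
--
--     def is_lock(l):
--         return any(p in l for p in _LOCK_FILE_PATTERNS)
--
--     def grab(ls):
--         # split off the longest non-header prefix
--         k = 0
--         while k < len(ls) and not is_header(ls[k]):
--             k += 1
--         return ls[:k], ls[k:]
--
--     pre, rest = grab(lines)
--     out = list(pre)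
--     while rest:
--         header, tail = rest[0], rest[1:]
--         body, rest = grab(tail)
--         if not is_lock(header):
--             out.append(header)
--             out.extend(body)
--     return "\n".join(out)
-- ===== Notes on version B (the rewrite author's own statement) =====
-- stated objective: alternative
-- what changed: Replaced the stateful skip-flag line scan with a partition of the diff into a preamble plus header-led segments, each segment kept or dropped whole by testing only its header line.
import Mathlib
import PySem

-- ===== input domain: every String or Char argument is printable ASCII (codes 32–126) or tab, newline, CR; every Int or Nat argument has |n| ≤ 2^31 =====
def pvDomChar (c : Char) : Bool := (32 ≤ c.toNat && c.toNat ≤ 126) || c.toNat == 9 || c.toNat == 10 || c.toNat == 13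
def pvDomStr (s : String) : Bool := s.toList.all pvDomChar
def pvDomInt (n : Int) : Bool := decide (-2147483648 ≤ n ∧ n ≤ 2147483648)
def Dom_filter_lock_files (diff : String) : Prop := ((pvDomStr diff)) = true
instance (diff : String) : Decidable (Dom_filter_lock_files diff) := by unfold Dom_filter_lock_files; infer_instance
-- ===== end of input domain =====

-- B replaces A's stateful skip-flag scan by a partition into preamble + header-led segments,
-- filtered per segment (objective: alternative decomposition, same cost).

-- ===== PORT A =====
-- stateful scan: (filtered lines so far, skip flag)
def filter_lock_files (diff : String) : String :=
  let r := ((PySem.Str.split? diff "\n").getD []).foldl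
    (fun (st : List String × Bool) line =>
      let skip :=
        if PySem.Str.startswith line "diff --git" then
          ["package-lock.json", "yarn.lock", "pnpm-lock.yaml", "go.sum"].any
            (fun p => PySem.Str.isIn p line)
        else st.2
      (if !skip then st.1 ++ [line] else st.1, skip))
    ([], false)
  PySem.Str.join "\n" r.1

-- ===== PORT B =====
def pvIsHeader (l : String) : Bool := PySem.Str.startswith l "diff --git"

def pvIsLock (l : String) : Bool :=
  ["package-lock.json", "yarn.lock", "pnpm-lock.yaml", "go.sum"].any
    (fun p => PySem.Str.isIn p l)

-- grab: longest non-header prefix, and the rest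
def pvGrab : List String → List String × List String
  | [] => ([], [])
  | l :: ls =>
    if pvIsHeader l then ([], l :: ls)
    else
      let (a, b) := pvGrab ls
      (l :: a, b)

theorem pvGrab_snd_len (ls : List String) : (pvGrab ls).2.length ≤ ls.length := by
  induction ls with
  | nil => simp [pvGrab]
  | cons l ls ih =>
    simp only [pvGrab]
    split
    · simp
    · simpa using Nat.le_succ_of_le ih

-- segment loop: rest is [] or starts with a header; keep header+body unless the header is a lock file
def pvSegs : List String → List String
  | [] => []
  | h :: ls =>
    (if pvIsLock h then [] else h :: (pvGrab ls).1) ++ pvSegs (pvGrab ls).2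
termination_by ls => ls.length
decreasing_by
  exact Nat.lt_succ_of_le (pvGrab_snd_len ls)

def filter_lock_files_alt (diff : String) : String :=
  let lines := (PySem.Str.split? diff "\n").getD []
  let (pre, rest) := pvGrab lines
  PySem.Str.join "\n" (pre ++ pvSegs rest)

-- ===== PRECONDITION & SPEC =====
def Spec_filter_lock_files (diff : String) (out : String) : Prop := out = filter_lock_files_alt diff
instance (diff : String) (out : String) : Decidable (Spec_filter_lock_files diff out) := by unfold Spec_filter_lock_files; infer_instance

-- ===== CLAIM (what is proved, stated in full; the proofs are below) =====
def Claim_equal_filter_lock_files : Prop := ∀ (diff : String), Dom_filter_lock_files diff → Spec_filter_lock_files diff (filter_lock_files diff)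

-- ===== LEMMAS AND PROOFS =====

-- A's kept lines, as a function of the incoming skip flag
def pvOut (skip : Bool) : List String → List String
  | [] => []
  | l :: ls =>
    let skip' := if pvIsHeader l then pvIsLock l else skip
    (if skip' then [] else [l]) ++ pvOut skip' ls

theorem pvFoldl_eq_out (ls : List String) (acc : List String) (skip : Bool) :
    (ls.foldl
      (fun (st : List String × Bool) line =>
        let s :=
          if PySem.Str.startswith line "diff --git" then
            ["package-lock.json", "yarn.lock", "pnpm-lock.yaml", "go.sum"].any
              (fun p => PySem.Str.isIn p line)
          else st.2
        (if !s then st.1 ++ [line] else st.1, s))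
      (acc, skip)).1 = acc ++ pvOut skip ls := by
  induction ls generalizing acc skip with
  | nil => simp [pvOut]
  | cons l ls ih =>
    simp only [List.foldl_cons, pvOut, pvIsHeader, pvIsLock]
    rw [ih]
    generalize (if PySem.Str.startswith l "diff --git" = true then
        ["package-lock.json", "yarn.lock", "pnpm-lock.yaml", "go.sum"].any
          (fun p => PySem.Str.isIn p l)
      else skip) = s
    cases s <;> simp

theorem pvGrab_shape (ls : List String) :
    (pvGrab ls).2 = [] ∨ ∃ h t, (pvGrab ls).2 = h :: t ∧ pvIsHeader h = true := by
  induction ls with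
  | nil => left; rfl
  | cons l ls ih =>
    simp only [pvGrab]
    by_cases h : pvIsHeader l = true
    · right; exact ⟨l, ls, by simp [h], h⟩
    · simpa [h] using ih

theorem pvOut_grab (skip : Bool) (ls : List String) :
    pvOut skip ls = (if skip then [] else (pvGrab ls).1) ++ pvOut skip (pvGrab ls).2 := by
  induction ls generalizing skip with
  | nil => cases skip <;> simp [pvGrab]
  | cons l ls ih =>
    simp only [pvGrab, pvOut]
    by_cases h : pvIsHeader l = true
    · simp [h, pvOut]
    · cases skip <;> simp [h, ih]

theorem pvOut_eq_segs (ls : List String) :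
    (ls = [] ∨ ∃ h t, ls = h :: t ∧ pvIsHeader h = true) →
    ∀ skip : Bool, pvOut skip ls = pvSegs ls := by
  induction ls using pvSegs.induct with
  | case1 => intro _ skip; simp [pvOut, pvSegs]
  | case2 h ls ih =>
    intro hshape skip
    rcases hshape with h0 | ⟨h', t', heq, hhead⟩
    · exact absurd h0 (by simp)
    · have hh : pvIsHeader h = true := by
        injection heq with e1 _; exact e1 ▸ hhead
      rw [pvSegs]
      have hout := pvOut_grab (pvIsLock h) ls
      have hrest := pvGrab_shape ls
      simp only [pvOut, hh, if_true]
      rw [hout, ih hrest (pvIsLock h)]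
      by_cases hl : pvIsLock h = true <;> simp [hl]

-- ===== VERDICT (by name: the statement is the Claim_ definition above) =====
theorem filter_lock_files_spec : Claim_equal_filter_lock_files := by
  intro diff _
  unfold Spec_filter_lock_files filter_lock_files filter_lock_files_alt
  simp only []
  rw [pvFoldl_eq_out, List.nil_append,
    pvOut_grab false, pvOut_eq_segs _ (pvGrab_shape _) false]
  simp
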